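-- pv_equiv track=rewrite | github.com/reallocf/data-flow-control | vldb_2026_big_paper_experiments/src/vldb_experiments/strategies/tpch_self_join_policy_queries.py | _alias_expression_map
-- ===== SOURCE A (Python) =====
-- from itertools import islice
--
-- CHUNKED_SELF_JOIN_THRESHOLD = 100
--
-- ALIAS_CHUNK_SIZE = 32
--
-- def _alias_names(self_join_count: int) -> list[str]:
--     if self_join_count < 1:
--         msg = "self_join_count must be at least 1"
--         raise ValueError(msg)
--     return [f"l{i}" for i in range(1, self_join_count + 2)]
--
-- def _chunked(iterable: list[str], chunk_size: int) -> list[list[str]]: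
--     iterator = iter(iterable)
--     return [list(chunk) for chunk in iter(lambda: list(islice(iterator, chunk_size)), [])]
--
-- def _chunk_column_name(alias: str) -> str:
--     return f"{alias}_shipdate"
--
-- def _chunk_subquery(chunk_aliases: list[str], chunk_index: int) -> tuple[str, dict[str, str]]:
--     inner_aliases = [f"c{chunk_index}_{idx}" for idx in range(1, len(chunk_aliases) + 1)]
--     alias_map = dict(zip(chunk_aliases, inner_aliases, strict=True))
--     select_lines = [f"    {inner_aliases[0]}.rowid AS base_rowid"]
--     outer_refs: dict[str, str] = {}
--     for outer_alias, inner_alias in alias_map.items():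
--         column_name = _chunk_column_name(outer_alias)
--         select_lines.append(f"    {inner_alias}.l_shipdate AS {column_name}")
--         outer_refs[outer_alias] = f"chunk_{chunk_index}.{column_name}"
--
--     tables = ",\n      ".join(f"lineitem {inner_alias}" for inner_alias in inner_aliases)
--     predicates = " AND ".join(
--         f"{inner_aliases[0]}.rowid = {inner_alias}.rowid" for inner_alias in inner_aliases[1:]
--     )
--     where_clause = f"\n    WHERE {predicates}" if predicates else ""
--     subquery = (
--         "JOIN (\n"
--         "  SELECT\n"
--         + ",\n".join(select_lines)
--         + "\n"
--         + "    FROM\n"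
--         + f"      {tables}"
--         + where_clause
--         + f"\n) chunk_{chunk_index}\n"
--         + f"  ON l1.rowid = chunk_{chunk_index}.base_rowid"
--     )
--     return subquery, outer_refs
--
-- def _alias_expression_map(self_join_count: int) -> dict[str, str]:
--     aliases = _alias_names(self_join_count)
--     if self_join_count <= CHUNKED_SELF_JOIN_THRESHOLD:
--         return {alias: f"{alias}.l_shipdate" for alias in aliases}
--
--     expression_map = {"l1": "l1.l_shipdate"}
--     for chunk_index, chunk_aliases in enumerate(
--         _chunked(aliases[1:], ALIAS_CHUNK_SIZE),
--         start=1,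
--     ):
--         _, outer_refs = _chunk_subquery(chunk_aliases, chunk_index)
--         expression_map.update(outer_refs)
--     return expression_map
-- ===== SOURCE B (Python) =====
-- CHUNKED_SELF_JOIN_THRESHOLD = 100
--
-- ALIAS_CHUNK_SIZE = 32
--
-- def _alias_names(self_join_count: int) -> list[str]:
--     if self_join_count < 1:
--         msg = "self_join_count must be at least 1"
--         raise ValueError(msg)
--     return [f"l{i}" for i in range(1, self_join_count + 2)]
--
-- def _alias_expression_map(self_join_count: int) -> dict[str, str]:
--     aliases = _alias_names(self_join_count)
--     if self_join_count <= CHUNKED_SELF_JOIN_THRESHOLD: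
--         return {alias: f"{alias}.l_shipdate" for alias in aliases}
--
--     expression_map = {"l1": "l1.l_shipdate"}
--     for i, alias in enumerate(aliases[1:]):
--         chunk_index = i // ALIAS_CHUNK_SIZE + 1
--         expression_map[alias] = f"chunk_{chunk_index}.{alias}_shipdate"
--     return expression_map
-- ===== Notes on version B (the rewrite author's own statement) =====
-- stated objective: simpler
-- what changed: The chunked branch is computed in one flat enumerate pass with chunk_index = i // ALIAS_CHUNK_SIZE + 1, dropping the _chunked list-of-lists helper and _chunk_subquery, whose large SQL subquery string A builds and discards.
import Mathlib
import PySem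

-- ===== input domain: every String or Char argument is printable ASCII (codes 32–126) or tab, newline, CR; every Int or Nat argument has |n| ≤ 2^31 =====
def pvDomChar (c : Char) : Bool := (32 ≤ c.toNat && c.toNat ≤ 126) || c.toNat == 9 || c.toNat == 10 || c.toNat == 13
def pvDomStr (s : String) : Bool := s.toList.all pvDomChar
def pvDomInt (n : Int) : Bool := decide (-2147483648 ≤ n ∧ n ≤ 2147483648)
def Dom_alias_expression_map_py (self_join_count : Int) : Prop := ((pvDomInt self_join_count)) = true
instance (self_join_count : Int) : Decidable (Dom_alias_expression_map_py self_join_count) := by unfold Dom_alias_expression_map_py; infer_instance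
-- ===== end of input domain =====

-- B replaces A's chunked branch (list-of-lists chunking plus a discarded SQL subquery string) by one flat
-- enumerate pass computing chunk_index = i // 32 + 1; same return value everywhere A returns.

-- ===== PORT A =====
-- _alias_names (identical helper in Source A and Source B; shared by both ports).
-- Pre_ excludes self_join_count < 1, where Python raises ValueError.
def pvAliasNames (self_join_count : Int) : List String :=
  (PySem.List.pyRange 1 (self_join_count + 2) 1).map (fun i => "l" ++ PySem.Int.toStr i)

-- _chunked(iterable, ALIAS_CHUNK_SIZE): the islice iterator loop splits the list into successive pieces of
-- 32 (the module constant it is called with); ported as take/drop recursion, exact for that call.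
def pvChunked : List String → List (List String)
  | [] => []
  | x :: xs => ((x :: xs).take 32) :: pvChunked ((x :: xs).drop 32)
  termination_by xs => xs.length
  decreasing_by simp

def pvChunkColumnName (al : String) : String := al ++ "_shipdate"

-- _chunk_subquery. dict(zip(...)) / outer_refs assignments: all keys are fresh (chunk aliases are distinct,
-- inner aliases are built once each), so the dicts are ported as association-list appends, which is exact.
-- inner_aliases[0] is ported with a default: every chunk _chunked yields is nonempty, so it is in range.
def pvChunkSubquery (chunkAliases : List String) (chunkIndex : Int) : String × List (String × String) :=
  let innerAliases : List String :=
    (PySem.List.pyRange 1 (PySem.List.len chunkAliases + 1) 1).map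
      (fun idx => "c" ++ PySem.Int.toStr chunkIndex ++ "_" ++ PySem.Int.toStr idx)
  let aliasMap : List (String × String) := chunkAliases.zip innerAliases
  let head0 : String := PySem.List.pyGetD innerAliases 0 ""
  let st :=
    aliasMap.foldl
      (fun (st : List String × List (String × String)) p =>
        (st.1 ++ ["    " ++ p.2 ++ ".l_shipdate AS " ++ pvChunkColumnName p.1],
         st.2 ++ [(p.1, "chunk_" ++ PySem.Int.toStr chunkIndex ++ "." ++ pvChunkColumnName p.1)]))
      (["    " ++ head0 ++ ".rowid AS base_rowid"], [])
  let tables := PySem.Str.join ",\n      " (innerAliases.map (fun a => "lineitem " ++ a))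
  let predicates :=
    PySem.Str.join " AND "
      ((PySem.List.slice innerAliases (some 1) none).map (fun a => head0 ++ ".rowid = " ++ a ++ ".rowid"))
  let whereClause := if predicates ≠ "" then "\n    WHERE " ++ predicates else ""
  let subquery :=
    "JOIN (\n" ++ "  SELECT\n" ++ PySem.Str.join ",\n" st.1 ++ "\n" ++ "    FROM\n" ++ "      " ++ tables
      ++ whereClause ++ "\n) chunk_" ++ PySem.Int.toStr chunkIndex ++ "\n"
      ++ "  ON l1.rowid = chunk_" ++ PySem.Int.toStr chunkIndex ++ ".base_rowid"
  (subquery, st.2)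

def alias_expression_map_py (self_join_count : Int) : List (String × String) :=
  let aliases := pvAliasNames self_join_count
  if self_join_count ≤ 100 then
    -- dict comprehension; the aliases are pairwise distinct, so the association list is exact
    aliases.map (fun a => (a, a ++ ".l_shipdate"))
  else
    (PySem.List.enumerate (pvChunked (PySem.List.slice aliases (some 1) none)) 1).foldl
      (fun expressionMap p => expressionMap ++ (pvChunkSubquery p.2 p.1).2)  -- .update with fresh keys
      [("l1", "l1.l_shipdate")]

-- ===== PORT B =====
def alias_expression_map_py_alt (self_join_count : Int) : List (String × String) :=
  let aliases := pvAliasNames self_join_count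
  if self_join_count ≤ 100 then
    aliases.map (fun a => (a, a ++ ".l_shipdate"))
  else
    ("l1", "l1.l_shipdate") ::
      (PySem.List.enumerate (PySem.List.slice aliases (some 1) none) 0).map
        (fun p =>
          (p.2, "chunk_" ++ PySem.Int.toStr (PySem.Int.floordiv p.1 32 + 1) ++ "." ++ p.2 ++ "_shipdate"))

-- ===== PRECONDITION & SPEC =====
-- A raises ValueError for self_join_count < 1 (in _alias_names); those inputs are excluded.
def Pre_alias_expression_map_py (self_join_count : Int) : Prop := 1 ≤ self_join_count
instance (self_join_count : Int) : Decidable (Pre_alias_expression_map_py self_join_count) := by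
  unfold Pre_alias_expression_map_py; infer_instance
def pvWitness_alias_expression_map_py : Int := (1)

def Spec_alias_expression_map_py (self_join_count : Int) (out : List (String × String)) : Prop :=
  out = alias_expression_map_py_alt self_join_count
instance (self_join_count : Int) (out : List (String × String)) :
    Decidable (Spec_alias_expression_map_py self_join_count out) := by
  unfold Spec_alias_expression_map_py; infer_instance

-- ===== CLAIM (what is proved, stated in full; the proofs are below) =====
def Claim_equal_alias_expression_map_py : Prop :=
  ∀ (self_join_count : Int), Dom_alias_expression_map_py self_join_count →
    Pre_alias_expression_map_py self_join_count →
    Spec_alias_expression_map_py self_join_count (alias_expression_map_py self_join_count)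

-- ===== LEMMAS AND PROOFS =====


theorem pv_zip_fst_map (l l' : List String) (g : String → String × String) (h : l.length ≤ l'.length) :
    (l.zip l').map (fun p => g p.1) = l.map g := by
  induction l generalizing l' with
  | nil => simp
  | cons x xs ih =>
    cases l' with
    | nil => simp at h
    | cons y ys => simp_all

theorem pvChunkSubquery_snd (chunk : List String) (idx : Int) :
    (pvChunkSubquery chunk idx).2
      = chunk.map (fun a => (a, "chunk_" ++ PySem.Int.toStr idx ++ "." ++ a ++ "_shipdate")) := by
  unfold pvChunkSubquery
  simp only []
  rw [PySem.List.foldl_prod_mk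
      (f := fun acc (p : String × String) => acc ++ ["    " ++ p.2 ++ ".l_shipdate AS " ++ pvChunkColumnName p.1])
      (g := fun acc (p : String × String) => acc ++ [(p.1, "chunk_" ++ PySem.Int.toStr idx ++ "." ++ pvChunkColumnName p.1)])]
  simp only [PySem.List.foldl_append_singleton_eq_map, List.nil_append]
  rw [pv_zip_fst_map (g := fun a => (a, "chunk_" ++ PySem.Int.toStr idx ++ "." ++ pvChunkColumnName a))]
  · simp [pvChunkColumnName, ← String.append_assoc]
  · simp [PySem.List.length_pyRange_one, PySem.List.len_eq]

theorem pv_enum_shift {α : Type} (xs : List α) (s t : Int) :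
    PySem.List.enumerate xs (s + t) = (PySem.List.enumerate xs s).map (fun p => (p.1 + t, p.2)) := by
  induction xs generalizing s with
  | nil => simp [PySem.List.enumerate_nil]
  | cons x xs ih =>
    simp only [PySem.List.enumerate_cons, List.map_cons]
    rw [show s + t + 1 = s + 1 + t by ring, ih (s+1)]

theorem pv_fd_shift (i : Int) : PySem.Int.floordiv (i + 32) 32 = PySem.Int.floordiv i 32 + 1 := by
  rw [PySem.Int.floordiv_eq_ediv_of_pos (by norm_num), PySem.Int.floordiv_eq_ediv_of_pos (by norm_num)]
  omega

theorem pv_chunks_flat (g : Int → String → String × String) (n : Nat) :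
    ∀ (L : List String), L.length ≤ n → ∀ (k : Int),
    (PySem.List.enumerate (pvChunked L) (k+1)).flatMap (fun p => p.2.map (g p.1))
      = (PySem.List.enumerate L 0).map (fun p => g (PySem.Int.floordiv p.1 32 + (k+1)) p.2) := by
  induction n with
  | zero =>
    intro L hL k
    have : L = [] := List.length_eq_zero_iff.mp (Nat.le_zero.mp hL)
    subst this
    simp [pvChunked, PySem.List.enumerate_nil]
  | succ n ih =>
    intro L hL k
    cases hLc : L with
    | nil => simp [pvChunked, PySem.List.enumerate_nil]
    | cons x xs =>
      rw [← hLc]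
      have hch : pvChunked L = L.take 32 :: pvChunked (L.drop 32) := by rw [hLc, pvChunked]
      rw [hch, PySem.List.enumerate_cons, List.flatMap_cons]
      have hrec := ih (L.drop 32) (by rw [hLc] at hL ⊢; simp at hL ⊢; omega) (k+1)
      rw [hrec]
      conv_rhs => rw [← List.take_append_drop 32 L, PySem.List.enumerate_append, List.map_append]
      congr 1
      · -- take part: indices are < 32, so floordiv gives 0
        rw [List.map_congr_left (f := fun p : Int × String => g (PySem.Int.floordiv p.1 32 + (k+1)) p.2)
            (g := fun p : Int × String => g (k+1) p.2) ?_]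
        · rw [show (fun p : Int × String => g (k+1) p.2) = (fun b => g (k+1) b) ∘ (fun p : Int × String => p.2) from rfl,
              ← List.map_map, PySem.List.map_snd_enumerate]
        · intro p hp
          rcases (PySem.List.mem_enumerate_iff _ _ _).mp hp with ⟨j, hj, rfl⟩
          have hj32 : j < 32 := lt_of_lt_of_le hj (by simp)
          simp only [zero_add]
          rw [show PySem.Int.floordiv (j : Int) 32 = 0 by
            rw [PySem.Int.floordiv_eq_ediv_of_pos (by norm_num)]; omega]
          simp
      · -- drop part: shift the enumeration start back to 0 and the chunk index up by one
        by_cases h32 : L.length ≤ 32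
        · rw [List.drop_eq_nil_of_le h32]
          simp [PySem.List.enumerate_nil]
        · have hlen : (L.take 32).length = 32 := by simp; omega
          rw [hlen]
          rw [show ((0:Int) + (32:Nat)) = (0 : Int) + (32:Int) by norm_num, pv_enum_shift, List.map_map]
          apply List.map_congr_left
          intro p _
          simp only [Function.comp_apply, pv_fd_shift]
          ring_nf

theorem pv_main_eq (n : Int) : alias_expression_map_py n = alias_expression_map_py_alt n := by
  unfold alias_expression_map_py alias_expression_map_py_alt
  by_cases h : n ≤ 100
  · simp [h]
  · simp only [h, if_false]
    set L := PySem.List.slice (pvAliasNames n) (some 1) none with hL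
    have hcong : ∀ (em : List (String × String)) (p : Int × List String),
        em ++ (pvChunkSubquery p.2 p.1).2
          = em ++ p.2.map (fun a => (a, "chunk_" ++ PySem.Int.toStr p.1 ++ "." ++ a ++ "_shipdate")) := by
      intro em p; rw [pvChunkSubquery_snd]
    simp only [hcong]
    rw [show (1:Int) = 0 + 1 by ring] at *
    rw [PySem.List.foldl_append_eq_flatMap
        (g := fun p : Int × List String => p.2.map (fun a => (a, "chunk_" ++ PySem.Int.toStr p.1 ++ "." ++ a ++ "_shipdate")))]
    rw [pv_chunks_flat (fun ci a => (a, "chunk_" ++ PySem.Int.toStr ci ++ "." ++ a ++ "_shipdate")) L.length L le_rfl 0]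
    simp

-- ===== VERDICT (by name: the statement is the Claim_ definition above) =====
theorem alias_expression_map_py_spec : Claim_equal_alias_expression_map_py := by
  intro n _ _
  unfold Spec_alias_expression_map_py
  exact pv_main_eq n
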